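-- pv_equiv track=rewrite | github.com/reccli/reccli | packages/reccli-core/reccli/memory_middleware.py | _is_continuing_same_task
-- ===== SOURCE A (Python) =====
-- from typing import List, Dict, Optional, Iterator
--
-- def _is_continuing_same_task(recent_messages: List[Dict]) -> bool:
--     """Detect if continuing same incremental work"""
--     if len(recent_messages) < 5:
--         return False
--
--     # Check if recent messages have high vocabulary overlap
--     all_text = ' '.join([m.get('content', '')[:100] for m in recent_messages])
--     words = all_text.lower().split()
--
--     if len(words) < 20:
--         return False
--
--     # Check for repeated words (sign of same task)
--     word_counts = {}
--     for word in words: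
--         if len(word) > 4:  # Ignore short words
--             word_counts[word] = word_counts.get(word, 0) + 1
--
--     # If many repeated meaningful words, likely same task
--     repeated = sum(1 for count in word_counts.values() if count >= 3)
--
--     return repeated >= 5
-- ===== SOURCE B (Python) =====
-- def _is_continuing_same_task(recent_messages):
--     """Detect if continuing same incremental work (sort-then-group scan instead of a frequency dict)"""
--     if len(recent_messages) < 5:
--         return False
--
--     all_text = ' '.join([m.get('content', '')[:100] for m in recent_messages])
--     words = all_text.lower().split()
--
--     if len(words) < 20:
--         return False
--
--     # sort the meaningful words, then count runs of length >= 3 with one linear scan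
--     meaningful = sorted(w for w in words if len(w) > 4)
--     repeated = 0
--     i = 0
--     n = len(meaningful)
--     while i < n:
--         j = i + 1
--         while j < n and meaningful[j] == meaningful[i]:
--             j += 1
--         if j - i >= 3:
--             repeated += 1
--         i = j
--     return repeated >= 5
-- ===== Notes on version B (the rewrite author's own statement) =====
-- stated objective: alternative
-- what changed: The hash-based frequency dict is replaced by sorting the >4-letter words and counting runs of length >= 3 in one run-length scan over the sorted list.
import Mathlib
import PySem

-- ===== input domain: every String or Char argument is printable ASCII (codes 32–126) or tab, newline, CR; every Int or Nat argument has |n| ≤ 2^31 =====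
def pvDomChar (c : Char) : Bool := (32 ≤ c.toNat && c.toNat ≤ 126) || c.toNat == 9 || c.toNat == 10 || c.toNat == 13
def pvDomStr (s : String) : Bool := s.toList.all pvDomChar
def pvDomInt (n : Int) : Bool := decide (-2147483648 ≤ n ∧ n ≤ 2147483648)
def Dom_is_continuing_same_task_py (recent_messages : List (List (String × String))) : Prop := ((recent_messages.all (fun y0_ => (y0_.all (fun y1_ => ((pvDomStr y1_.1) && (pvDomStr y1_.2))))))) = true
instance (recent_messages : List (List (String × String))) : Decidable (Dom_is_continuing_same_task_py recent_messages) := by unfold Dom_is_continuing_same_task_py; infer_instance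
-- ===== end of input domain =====

-- B replaces A's hash-based frequency dict by sorting the >4-letter words and counting runs of
-- length ≥ 3 in one run-length scan (alternative algorithm, same result).

-- ===== PORT A =====
def is_continuing_same_task_py (recent_messages : List (List (String × String))) : Bool :=
  if recent_messages.length < 5 then false
  else
    let all_text := PySem.Str.join " " (recent_messages.map (fun m =>
      PySem.Str.slice ((PySem.Dict.mk m).getD "content" "") none (some (100 : Int))))
    let words := PySem.Str.split₀ (PySem.Str.lower all_text)
    if words.length < 20 then false
    else
      let word_counts := words.foldl (fun (d : PySem.Dict String Int) w =>
        if 4 < PySem.Str.len w then d.insert w (d.getD w 0 + 1) else d) PySem.Dict.empty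
      let repeated := word_counts.values.countP (fun c => decide ((3 : Int) ≤ c))
      decide (5 ≤ repeated)

-- ===== PORT B =====
-- run-length scan over a (sorted) list: the outer while loop of Source B; the inner while loop
-- (advancing j over equal elements) is the takeWhile/dropWhile split
def pvRunsGe3 : List String → Nat
  | [] => 0
  | w :: rest =>
    (if 3 ≤ (rest.takeWhile (fun x => x == w)).length + 1 then 1 else 0)
      + pvRunsGe3 (rest.dropWhile (fun x => x == w))
termination_by l => l.length
decreasing_by
  simp only [List.length_cons]
  exact Nat.lt_succ_of_le (List.length_dropWhile_le _ _)

def is_continuing_same_task_py_alt (recent_messages : List (List (String × String))) : Bool :=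
  if recent_messages.length < 5 then false
  else
    let all_text := PySem.Str.join " " (recent_messages.map (fun m =>
      PySem.Str.slice ((PySem.Dict.mk m).getD "content" "") none (some (100 : Int))))
    let words := PySem.Str.split₀ (PySem.Str.lower all_text)
    if words.length < 20 then false
    else
      let meaningful := PySem.List.sorted (words.filter (fun w => decide (4 < PySem.Str.len w))) (fun x => x) false
      decide (5 ≤ pvRunsGe3 meaningful)

-- ===== PRECONDITION & SPEC =====
def Spec_is_continuing_same_task_py (recent_messages : List (List (String × String))) (out : Bool) : Prop := out = is_continuing_same_task_py_alt recent_messages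
instance (recent_messages : List (List (String × String))) (out : Bool) : Decidable (Spec_is_continuing_same_task_py recent_messages out) := by unfold Spec_is_continuing_same_task_py; infer_instance

-- ===== CLAIM (what is proved, stated in full; the proofs are below) =====
def Claim_equal_is_continuing_same_task_py : Prop := ∀ (recent_messages : List (List (String × String))), Dom_is_continuing_same_task_py recent_messages → Spec_is_continuing_same_task_py recent_messages (is_continuing_same_task_py recent_messages)

-- ===== LEMMAS AND PROOFS =====

-- run-length scan over a sorted list = number of distinct elements occurring ≥ 3 times,
-- counted along any nodup enumeration s of l's elements
lemma pvRunsGe3_sorted_countP : ∀ (n : Nat) (l : List String), l.length ≤ n →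
    l.Pairwise (· ≤ ·) → ∀ (s : List String), s.Nodup → (∀ k, k ∈ s ↔ k ∈ l) →
    pvRunsGe3 l = s.countP (fun k => decide (3 ≤ l.count k)) := by
  intro n
  induction n with
  | zero =>
    intro l hl _ s _ hmem
    have hl0 : l = [] := List.eq_nil_of_length_eq_zero (Nat.le_zero.mp hl)
    subst hl0
    have hs : s = [] := List.eq_nil_iff_forall_not_mem.mpr (fun k hk => by simpa using (hmem k).mp hk)
    subst hs; simp [pvRunsGe3]
  | succ n ih =>
    intro l hl hp s hnd hmem
    match l with
    | [] =>
      have hs : s = [] := List.eq_nil_iff_forall_not_mem.mpr (fun k hk => by simpa using (hmem k).mp hk)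
      subst hs; simp [pvRunsGe3]
    | w :: rest =>
      have hsplit : rest.takeWhile (fun x => x == w) ++ rest.dropWhile (fun x => x == w) = rest :=
        List.takeWhile_append_dropWhile
      set run := rest.takeWhile (fun x => x == w) with hrundef
      set rest' := rest.dropWhile (fun x => x == w) with hrestdef
      have hrun : ∀ x ∈ run, x = w := fun x hx => by
        have := List.mem_takeWhile_imp hx; simpa using this
      rcases List.pairwise_cons.mp hp with ⟨hwle, hprest⟩
      have hpr' : rest'.Pairwise (· ≤ ·) :=
        List.Pairwise.sublist (List.dropWhile_sublist _) hprest
      have hne : ∀ x ∈ rest', x ≠ w := by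
        rcases hr : rest' with _ | ⟨b, t⟩
        · intro x hx; simp at hx
        · have hb : (b == w) = false := by
            have := List.head_dropWhile_not (fun x => x == w) (l := rest)
              (by rw [← hrestdef, hr]; simp)
            simpa [← hrestdef, hr] using this
          have hbw : b ≠ w := by simpa using hb
          have hble : w < b := lt_of_le_of_ne
            (hwle b ((List.dropWhile_sublist _).mem (by rw [← hrestdef, hr]; simp)))
            (Ne.symm hbw)
          intro x hx
          try rw [hr] at hx
          rcases List.mem_cons.mp hx with h | h
          · subst h; exact hbw
          · have : b ≤ x := by
              have := hpr'; rw [hr] at this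
              exact (List.pairwise_cons.mp this).1 x h
            intro hxw; subst hxw; exact absurd (lt_of_lt_of_le hble this) (lt_irrefl x)
      have hcrun : run.count w = run.length :=
        List.count_eq_length.mpr (fun b hb => (hrun b hb).symm)
      have hcw : (w :: rest).count w = run.length + 1 := by
        rw [← hsplit]
        simp [List.count_append, hcrun,
          List.count_eq_zero.mpr (fun h => hne w h rfl)]
      have hck : ∀ k, k ≠ w → (w :: rest).count k = rest'.count k := by
        intro k hk
        rw [← hsplit]
        have hkr : run.count k = 0 :=
          List.count_eq_zero.mpr (fun h => hk (hrun k h))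
        simp [List.count_append, hkr, Ne.symm hk]
      have hws : w ∈ s := (hmem w).mpr List.mem_cons_self
      have hperm : s.Perm (w :: s.erase w) := List.perm_cons_erase hws
      have hmem' : ∀ k, k ∈ s.erase w ↔ k ∈ rest' := by
        intro k
        rw [hnd.mem_erase_iff]
        constructor
        · rintro ⟨hkw, hks⟩
          have := (hmem k).mp hks
          rw [← hsplit] at this
          rcases List.mem_cons.mp this with h | h
          · exact absurd h hkw
          · rcases List.mem_append.mp h with h | h
            · exact absurd (hrun k h) hkw
            · exact h
        · intro hk
          refine ⟨hne k hk, (hmem k).mpr ?_⟩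
          rw [← hsplit]
          exact List.mem_cons_of_mem _ (List.mem_append_right _ hk)
      have hlen' : rest'.length ≤ n := by
        have h1 : rest'.length ≤ rest.length := List.length_dropWhile_le _ _
        have h2 : rest.length + 1 ≤ n + 1 := by simpa using hl
        omega
      have hIH := ih rest' hlen' hpr' (s.erase w) (hnd.erase w) hmem'
      have hcountP : s.countP (fun k => decide (3 ≤ (w :: rest).count k)) =
          (s.erase w).countP (fun k => decide (3 ≤ rest'.count k)) +
            (if 3 ≤ run.length + 1 then 1 else 0) := by
        rw [hperm.countP_eq, List.countP_cons]
        congr 1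
        · exact List.countP_congr (fun k hk => by
            rw [hck k ((hnd.mem_erase_iff.mp hk).1)])
        · simp [hcw]
      rw [hcountP, ← hIH]
      simp only [pvRunsGe3, ← hrundef, ← hrestdef]
      omega

lemma countA_eq_countB (ws : List String) :
    ((ws.foldl (fun (d : PySem.Dict String Int) w =>
        if 4 < PySem.Str.len w then d.insert w (d.getD w 0 + 1) else d)
      PySem.Dict.empty).values.countP (fun c => decide ((3 : Int) ≤ c))) =
    pvRunsGe3 (PySem.List.sorted (ws.filter (fun w => decide (4 < PySem.Str.len w))) (fun x => x) false) := by
  set mf := ws.filter (fun w => decide (4 < PySem.Str.len w)) with hmf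
  have hfold : ws.foldl (fun (d : PySem.Dict String Int) w =>
      if 4 < PySem.Str.len w then d.insert w (d.getD w 0 + 1) else d) PySem.Dict.empty
      = PySem.Dict.counter mf := by
    rw [← PySem.Dict.foldl_insert_getD_add_one_eq_counter, hmf, List.foldl_filter]
    simp
  rw [hfold]
  have hA : (PySem.Dict.counter mf).values.countP (fun c => decide ((3 : Int) ≤ c)) =
      (PySem.Set.ofList mf).countP (fun k => decide (3 ≤ mf.count k)) := by
    simp only [PySem.Dict.values, PySem.Dict.items_counter, List.map_map, List.countP_map]
    exact List.countP_congr (fun k _ => by simp [Function.comp])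
  have hB : pvRunsGe3 (PySem.List.sorted mf (fun x => x) false) =
      (PySem.Set.ofList mf).countP (fun k => decide (3 ≤ mf.count k)) := by
    have hkey := pvRunsGe3_sorted_countP (PySem.List.sorted mf (fun x => x) false).length
      (PySem.List.sorted mf (fun x => x) false) le_rfl
      (by simpa using PySem.List.sorted_pairwise mf (fun x => x))
      (PySem.Set.ofList mf) (PySem.Set.nodup_ofList mf)
      (fun k => by rw [PySem.Set.mem_ofList, PySem.List.mem_sorted])
    rw [hkey]
    exact List.countP_congr (fun k _ => by
      rw [(PySem.List.sorted_perm mf (fun x => x) false).count_eq])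
  rw [hA, hB]

theorem is_continuing_same_task_py_spec : Claim_equal_is_continuing_same_task_py := by
  intro rm _
  unfold Spec_is_continuing_same_task_py is_continuing_same_task_py is_continuing_same_task_py_alt
  dsimp only
  split_ifs with h1 h2
  · rfl
  · rfl
  · rw [countA_eq_countB]
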